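-- pv_equiv track=rewrite | github.com/MrBrantCode/unitest_baseline | mut_generate/mist_train_taco/taco_7639/solution.py | find_occurrence_difference
-- ===== SOURCE A (Python) =====
-- def find_occurrence_difference(arr, n):
--     # Dictionary to store the frequency of each element
--     frequency_dict = {}
--
--     # Count the occurrences of each element in the array
--     for num in arr:
--         if num in frequency_dict:
--             frequency_dict[num] += 1
--         else:
--             frequency_dict[num] = 1
--
--     # Get the values (frequencies) from the dictionary
--     frequencies = frequency_dict.values()
--
--     # Calculate the difference between the highest and lowest occurrence
--     if len(frequencies) == 1:
--         return 0
--     else: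
--         return max(frequencies) - min(frequencies)
-- ===== SOURCE B (Python) =====
-- def find_occurrence_difference(arr, n):
--     s = sorted(arr)
--     lengths = []
--     run = 0
--     prev = None
--     for x in s:
--         if run > 0 and x == prev:
--             run += 1
--         else:
--             if run > 0:
--                 lengths.append(run)
--             run = 1
--         prev = x
--     if run > 0:
--         lengths.append(run)
--     return max(lengths) - min(lengths)
-- ===== Notes on version B (the rewrite author's own statement) =====
-- stated objective: alternative
-- what changed: Replaces the hash-map frequency counter (and the length-1 special case) with sort-then-scan: group consecutive equal elements of a sorted copy into run lengths and return max(run lengths) - min(run lengths).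
-- outside the precondition, e.g. on find_occurrence_difference([], 0): A raises ValueError, B raises ValueError
import Mathlib
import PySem

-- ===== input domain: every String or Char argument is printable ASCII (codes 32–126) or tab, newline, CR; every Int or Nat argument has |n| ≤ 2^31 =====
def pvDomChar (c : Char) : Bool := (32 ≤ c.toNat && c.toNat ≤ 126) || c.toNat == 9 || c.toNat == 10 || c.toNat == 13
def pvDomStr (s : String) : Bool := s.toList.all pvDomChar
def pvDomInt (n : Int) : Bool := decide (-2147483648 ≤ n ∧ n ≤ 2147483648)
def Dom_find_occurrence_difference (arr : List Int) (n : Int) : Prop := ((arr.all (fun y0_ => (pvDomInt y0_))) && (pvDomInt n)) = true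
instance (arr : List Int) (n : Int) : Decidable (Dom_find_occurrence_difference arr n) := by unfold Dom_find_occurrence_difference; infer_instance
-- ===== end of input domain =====

-- B replaces A's hash-map frequency counter by sort-then-scan over consecutive runs (alternative algorithm, similar cost).


-- ===== PORT A =====
-- Literal port of A: build the frequency dict with the contains-branch loop, take its
-- values, special-case a single distinct element, else max - min of the values.
-- The '.getD 0' after max?/min? is unreachable under Pre_ (arr ≠ [] ⇒ values ≠ []);
-- Python raises ValueError exactly where max?/min? are none.
def find_occurrence_difference (arr : List Int) (n : Int) : Int :=
  let frequency_dict := arr.foldl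
    (fun d num => if d.contains num then d.insert num (d.getD num 0 + 1) else d.insert num 1)
    PySem.Dict.empty
  let frequencies := frequency_dict.values
  if frequencies.length = 1 then 0
  else (PySem.List.max? frequencies (fun v => v)).getD 0
       - (PySem.List.min? frequencies (fun v => v)).getD 0

-- ===== PORT B =====
-- B's run-grouping loop over the sorted copy: 'prev'/'run' carried through the scan,
-- each finished run length appended; here as structural recursion emitting run lengths.
def pvRuns (prev : Int) (run : Int) : List Int → List Int
  | [] => [run]
  | x :: t => if x = prev then pvRuns x (run + 1) t else run :: pvRuns x 1 t

def find_occurrence_difference_alt (arr : List Int) (n : Int) : Int :=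
  let s := PySem.List.sorted arr (fun x => x) false
  match s with
  | [] => 0  -- Python: max([]) raises ValueError here; excluded by Pre_
  | x :: t =>
    let lengths := pvRuns x 1 t
    (PySem.List.max? lengths (fun v => v)).getD 0
      - (PySem.List.min? lengths (fun v => v)).getD 0

-- ===== PRECONDITION & SPEC =====
-- Pre_ excludes only the empty list, on which Python A (and B) raise ValueError (max of an empty sequence).
def Pre_find_occurrence_difference (arr : List Int) (n : Int) : Prop := arr ≠ []
instance (arr : List Int) (n : Int) : Decidable (Pre_find_occurrence_difference arr n) := by unfold Pre_find_occurrence_difference; infer_instance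

def pvWitness_find_occurrence_difference : List Int × Int := ([1, 1, 2], 3)

def Spec_find_occurrence_difference (arr : List Int) (n : Int) (out : Int) : Prop := out = find_occurrence_difference_alt arr n
instance (arr : List Int) (n : Int) (out : Int) : Decidable (Spec_find_occurrence_difference arr n out) := by unfold Spec_find_occurrence_difference; infer_instance

-- ===== CLAIM (what is proved, stated in full; the proofs are below) =====
def Claim_equal_find_occurrence_difference : Prop := ∀ (arr : List Int) (n : Int), Dom_find_occurrence_difference arr n → Pre_find_occurrence_difference arr n → Spec_find_occurrence_difference arr n (find_occurrence_difference arr n)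

-- ===== LEMMAS AND PROOFS =====

-- run lengths of a whole list (proof-side view of B's scan)
def pvRunsOf : List Int → List Int
  | [] => []
  | x :: t => pvRuns x 1 t

lemma pvRuns_eq (t : List Int) : ∀ x c, pvRuns x c t =
    (c + ((t.takeWhile (· == x)).length : Int)) :: pvRunsOf (t.dropWhile (· == x)) := by
  induction t with
  | nil => intro x c; simp [pvRuns, pvRunsOf]
  | cons y u ih =>
    intro x c
    by_cases h : y = x
    · subst h
      simp only [pvRuns, List.takeWhile_cons, List.dropWhile_cons, beq_self_eq_true, if_pos]
      rw [ih y (c + 1)]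
      simp; ring_nf
    · have hb : (y == x) = false := by simp [h]
      simp [pvRuns, h, hb, pvRunsOf]

-- Set.add appends past a differing head
lemma set_add_cons (x y : Int) (s : List Int) (h : y ≠ x) :
    PySem.Set.add (x :: s) y = x :: PySem.Set.add s y := by
  by_cases hm : y ∈ s <;> simp [PySem.Set.add, PySem.Set.contains, h, hm]

lemma foldl_add_cons (l : List Int) : ∀ (s : List Int) (x : Int), x ∉ l →
    List.foldl PySem.Set.add (x :: s) l = x :: List.foldl PySem.Set.add s l := by
  induction l with
  | nil => intro s x _; rfl
  | cons y u ih =>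
    intro s x hx
    have hyx : y ≠ x := fun h => hx (by simp [h])
    simp only [List.foldl_cons, set_add_cons x y s hyx]
    exact ih _ x (fun h => hx (List.mem_cons_of_mem _ h))

lemma foldl_add_const (l : List Int) (s : List Int) (x : Int)
    (hall : ∀ y ∈ l, y = x) (hx : x ∈ s) :
    List.foldl PySem.Set.add s l = s := by
  induction l with
  | nil => rfl
  | cons y u ih =>
    have hy : y = x := hall y (List.mem_cons_self ..)
    have : PySem.Set.add s y = s := by
      have hys : y ∈ s := hy ▸ hx
      simp [PySem.Set.add, PySem.Set.contains, hys]
    simp only [List.foldl_cons, this]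
    exact ih (fun z hz => hall z (List.mem_cons_of_mem _ hz))

-- key facts about the sorted head block
lemma not_mem_dropWhile_of_sorted (x : Int) (t : List Int)
    (hs : List.Pairwise (· ≤ ·) (x :: t)) : x ∉ t.dropWhile (· == x) := by
  intro hmem
  cases hd : t.dropWhile (· == x) with
  | nil => simp [hd] at hmem
  | cons z d =>
    have hz : (z == x) = false := by
      have h := List.head?_dropWhile_not (· == x) t
      rw [hd] at h; simpa using h
    have hzx : z ≠ x := by simpa using hz
    have hsub : (t.dropWhile (· == x)).Sublist t := List.dropWhile_sublist _
    have hst : List.Pairwise (· ≤ ·) (z :: d) := by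
      rw [← hd]; exact List.Pairwise.sublist hsub hs.of_cons
    have hxz : x ≤ z := by
      have : z ∈ t := hsub.mem (by simp [hd])
      exact (List.pairwise_cons.mp hs).1 z this
    have hxlt : x < z := lt_of_le_of_ne hxz (fun h => hzx h.symm)
    rw [hd] at hmem
    rcases List.mem_cons.mp hmem with h | h
    · exact hzx h.symm
    · have : z ≤ x := (List.pairwise_cons.mp hst).1 x h
      omega

lemma count_takeWhile (x : Int) (t : List Int)
    (hs : List.Pairwise (· ≤ ·) (x :: t)) :
    (t.takeWhile (· == x)).length = t.count x := by
  conv_rhs => rw [← List.takeWhile_append_dropWhile (p := (· == x)) (l := t)]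
  rw [List.count_append]
  have h1 : (t.takeWhile (· == x)).count x = (t.takeWhile (· == x)).length := by
    apply List.count_eq_length.mpr
    intro b hb
    have hbx : b = x := by simpa using List.mem_takeWhile_imp hb
    exact hbx.symm
  have h2 : (t.dropWhile (· == x)).count x = 0 :=
    List.count_eq_zero.mpr (not_mem_dropWhile_of_sorted x t hs)
  omega

-- the main characterisation of B's scan on a sorted list
lemma pvRunsOf_spec : ∀ (n : Nat) (s : List Int), s.length ≤ n →
    List.Pairwise (· ≤ ·) s →
    pvRunsOf s = (PySem.Set.ofList s).map (fun k => (s.count k : Int)) := by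
  intro n
  induction n with
  | zero => intro s hlen _; have : s = [] := List.eq_nil_of_length_eq_zero (by omega); simp [this, pvRunsOf, PySem.Set.ofList]
  | succ m ih =>
    intro s hlen hs
    cases s with
    | nil => simp [pvRunsOf, PySem.Set.ofList]
    | cons x t =>
      set tk := t.takeWhile (· == x) with htk
      set d := t.dropWhile (· == x) with hdd
      have hxd : x ∉ d := not_mem_dropWhile_of_sorted x t hs
      have hsplit : tk ++ d = t := List.takeWhile_append_dropWhile
      have htkall : ∀ y ∈ tk, y = x := by
        intro y hy; have := List.mem_takeWhile_imp hy; simpa using this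
      -- LHS
      have hL : pvRunsOf (x :: t) = (1 + (tk.length : Int)) :: pvRunsOf d := by
        simp only [pvRunsOf]; rw [pvRuns_eq t x 1]; rfl
      -- distinct elements of x :: t
      have hset : PySem.Set.ofList (x :: t) = x :: PySem.Set.ofList d := by
        rw [PySem.Set.ofList_eq_foldl, PySem.Set.ofList_eq_foldl]
        have hadd : PySem.Set.add ([] : List Int) x = [x] := by rfl
        simp only [List.foldl_cons, hadd]
        rw [← hsplit, List.foldl_append]
        rw [foldl_add_const tk [x] x htkall (by simp)]
        exact foldl_add_cons d [] x hxd
      -- sortedness of d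
      have hsd : List.Pairwise (· ≤ ·) d :=
        List.Pairwise.sublist (List.dropWhile_sublist _) hs.of_cons
      have hdlen : d.length ≤ m := by
        have h1 : d.Sublist t := List.dropWhile_sublist _
        have := h1.length_le
        simp at hlen; omega
      -- counts
      have hcx : ((x :: t).count x : Int) = 1 + (tk.length : Int) := by
        rw [List.count_cons_self, htk, count_takeWhile x t hs]; push_cast; ring
      have hck : ∀ k ∈ PySem.Set.ofList d, ((x :: t).count k : Int) = (d.count k : Int) := by
        intro k hk
        have hkd : k ∈ d := (PySem.Set.mem_ofList d k).mp hk
        have hkx : k ≠ x := fun h => hxd (h ▸ hkd)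
        have hx1 : List.count k (x :: t) = List.count k t := by
          simp [Ne.symm hkx]
        rw [hx1, ← hsplit, List.count_append]
        have : tk.count k = 0 := List.count_eq_zero.mpr (fun hmem => hkx (htkall k hmem))
        simp [this]
      rw [hL, hset, List.map_cons, hcx]
      congr 1
      rw [ih d hdlen hsd]
      exact (List.map_congr_left hck).symm

-- A's dict is Counter(arr)
lemma dictA_eq_counter (arr : List Int) :
    arr.foldl (fun d num => if d.contains num then d.insert num (d.getD num 0 + 1) else d.insert num 1)
      PySem.Dict.empty = PySem.Dict.counter arr := by
  rw [← PySem.Dict.foldl_insert_getD_add_one_eq_counter]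
  apply PySem.List.foldl_congr_mem
  intro d num _
  by_cases h : d.contains num = true
  · simp [h]
  · have h0 : d.getD num 0 = 0 :=
      PySem.Dict.getD_of_not_contains d 0 (by simpa using h)
    simp [h, h0]

lemma values_counter (arr : List Int) :
    (PySem.Dict.counter arr).values = (PySem.Set.ofList arr).map (fun k => (arr.count k : Int)) := by
  show ((PySem.Dict.counter arr).items).map (·.2) = _
  rw [PySem.Dict.items_counter, List.map_map]
  rfl

-- max?/min? with identity key are permutation-invariant
lemma max?_id_perm {xs ys : List Int} (h : xs.Perm ys) :
    PySem.List.max? xs (fun v => v) = PySem.List.max? ys (fun v => v) := by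
  cases hx : PySem.List.max? xs (fun v => v) with
  | none =>
    have hx0 : xs = [] := (PySem.List.max?_eq_none_iff xs _).mp hx
    have hy0 : ys = [] := by rw [hx0] at h; exact h.symm.eq_nil
    rw [(PySem.List.max?_eq_none_iff ys _).mpr hy0]
  | some m =>
    cases hy : PySem.List.max? ys (fun v => v) with
    | none =>
      have hyn : ys = [] := (PySem.List.max?_eq_none_iff ys _).mp hy
      have := PySem.List.max?_mem hx
      rw [hyn] at h; simp [h.eq_nil] at this
    | some m' =>
      have h1 : m ≤ m' := PySem.List.max?_isMax hy m (h.mem_iff.mp (PySem.List.max?_mem hx))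
      have h2 : m' ≤ m := PySem.List.max?_isMax hx m' (h.mem_iff.mpr (PySem.List.max?_mem hy))
      simp [le_antisymm h1 h2]

lemma min?_id_perm {xs ys : List Int} (h : xs.Perm ys) :
    PySem.List.min? xs (fun v => v) = PySem.List.min? ys (fun v => v) := by
  cases hx : PySem.List.min? xs (fun v => v) with
  | none =>
    have hx0 : xs = [] := (PySem.List.min?_eq_none_iff xs _).mp hx
    have hy0 : ys = [] := by rw [hx0] at h; exact h.symm.eq_nil
    rw [(PySem.List.min?_eq_none_iff ys _).mpr hy0]
  | some m =>
    cases hy : PySem.List.min? ys (fun v => v) with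
    | none =>
      have hyn : ys = [] := (PySem.List.min?_eq_none_iff ys _).mp hy
      have := PySem.List.min?_mem hx
      rw [hyn] at h; simp [h.eq_nil] at this
    | some m' =>
      have h1 : m ≤ m' := PySem.List.min?_isMin hx m' (h.mem_iff.mpr (PySem.List.min?_mem hy))
      have h2 : m' ≤ m := PySem.List.min?_isMin hy m (h.mem_iff.mp (PySem.List.min?_mem hx))
      simp [le_antisymm h1 h2]

-- B's run-length list is a permutation of A's frequency list
lemma runs_perm_freqs (arr : List Int) :
    (pvRunsOf (PySem.List.sorted arr (fun x => x) false)).Perm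
      ((PySem.Set.ofList arr).map (fun k => (arr.count k : Int))) := by
  set s := PySem.List.sorted arr (fun x => x) false with hsdef
  have hperm : s.Perm arr := PySem.List.sorted_perm arr _ false
  have hpw : List.Pairwise (· ≤ ·) s := PySem.List.sorted_pairwise arr (fun x => x)
  rw [pvRunsOf_spec s.length s le_rfl hpw]
  have hsets : (PySem.Set.ofList s).Perm (PySem.Set.ofList arr) := by
    rw [List.perm_ext_iff_of_nodup (PySem.Set.nodup_ofList s) (PySem.Set.nodup_ofList arr)]
    intro a
    rw [PySem.Set.mem_ofList, PySem.Set.mem_ofList]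
    exact hperm.mem_iff
  have hcnt : ∀ k ∈ PySem.Set.ofList s, ((s.count k : Int)) = ((arr.count k : Int)) := by
    intro k _; exact_mod_cast hperm.count_eq k
  rw [List.map_congr_left hcnt]
  exact hsets.map _

-- ===== VERDICT (by name: the statement is the Claim_ definition above) =====
theorem find_occurrence_difference_spec : Claim_equal_find_occurrence_difference := by
  intro arr n _ hpre
  unfold Spec_find_occurrence_difference find_occurrence_difference find_occurrence_difference_alt
  simp only [dictA_eq_counter, values_counter]
  set F := (PySem.Set.ofList arr).map (fun k => (arr.count k : Int)) with hF
  cases hsc : PySem.List.sorted arr (fun x => x) false with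
  | nil => exact absurd ((PySem.List.sorted_eq_nil_iff arr _ false).mp hsc) hpre
  | cons x t =>
    have hperm : (pvRuns x 1 t).Perm F := by
      have h := runs_perm_freqs arr
      rw [hsc] at h
      simpa only [pvRunsOf] using h
    show (if F.length = 1 then 0
          else (PySem.List.max? F (fun v => v)).getD 0 - (PySem.List.min? F (fun v => v)).getD 0)
        = (PySem.List.max? (pvRuns x 1 t) (fun v => v)).getD 0
          - (PySem.List.min? (pvRuns x 1 t) (fun v => v)).getD 0
    by_cases hlen : F.length = 1
    · -- single distinct value: A returns 0, B's run list is that one length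
      obtain ⟨a, ha⟩ : ∃ a, F = [a] := List.length_eq_one_iff.mp hlen
      have hone : pvRuns x 1 t = [a] := List.perm_singleton.mp (ha ▸ hperm)
      rw [if_pos hlen, hone]
      simp [PySem.List.max?_id_cons, PySem.List.min?_id_cons]
    · rw [if_neg hlen, max?_id_perm hperm, min?_id_perm hperm]
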